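-- pv_equiv track=rewrite | github.com/easternpillar/AlgorithmTraining | SW Expert Academy/D3/[SW 문제해결 기본] 5일차 - Magnetic.py | deadlock
-- ===== SOURCE A (Python) =====
-- def deadlock(seq):
--     idx = 0
--     total = 0
--     flag = 0
--     while idx < len(seq):
--         if seq[idx] == '1':
--             idx += 1
--             while idx < len(seq):
--                 if seq[idx] == '1':
--                     total += flag
--                     flag = 0
--                 elif seq[idx] == '2':
--                     flag = 1
--                 idx += 1
--         if flag == 1:
--             total += flag
--         idx += 1
--     return total
-- ===== SOURCE B (Python) =====
-- def deadlock(seq):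
--     first = seq.find('1')
--     if first == -1:
--         return 0
--     return sum('2' in part for part in seq[first + 1:].split('1'))
-- ===== Notes on version B (the rewrite author's own statement) =====
-- stated objective: simpler
-- what changed: Replaced the stateful nested while-loop index scan (flag/total bookkeeping) with locating the first separator via find, slicing the tail, splitting it on the separator and counting the segments that contain a pending magnet.
import Mathlib
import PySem

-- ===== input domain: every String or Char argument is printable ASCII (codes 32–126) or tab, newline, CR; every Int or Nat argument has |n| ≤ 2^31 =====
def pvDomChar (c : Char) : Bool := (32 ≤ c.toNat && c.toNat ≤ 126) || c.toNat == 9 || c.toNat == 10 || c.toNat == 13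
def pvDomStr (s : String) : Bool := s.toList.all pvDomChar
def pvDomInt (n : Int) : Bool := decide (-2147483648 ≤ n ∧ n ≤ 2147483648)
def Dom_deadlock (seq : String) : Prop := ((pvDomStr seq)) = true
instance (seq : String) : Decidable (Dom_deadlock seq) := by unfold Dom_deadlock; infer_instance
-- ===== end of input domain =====

-- B replaces A's stateful nested-while flag scan by find-first-'1', slice, split on '1', count parts with '2' (simpler decomposition, same cost).

-- ===== PORT A =====
-- inner while loop of A: walks the rest of the string, state (total, flag)
def deadlockInner : List Char → Int → Int → Int × Int
  | [], total, flag => (total, flag)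
  | c :: rest, total, flag =>
    if c = '1' then deadlockInner rest (total + flag) 0
    else if c = '2' then deadlockInner rest total 1
    else deadlockInner rest total flag

-- outer while loop of A; after the inner loop finishes the same iteration
-- still runs the `if flag == 1: total += flag` check, then idx is past the end
def deadlockOuter : List Char → Int → Int → Int
  | [], total, _ => total
  | c :: rest, total, flag =>
    if c = '1' then
      let r := deadlockInner rest total flag
      if r.2 = 1 then r.1 + 1 else r.1
    else
      deadlockOuter rest (if flag = 1 then total + 1 else total) flag

def deadlock (seq : String) : Int := deadlockOuter seq.toList 0 0

-- ===== PORT B =====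
def deadlock_alt (seq : String) : Int :=
  let first := PySem.Str.find seq "1"
  if first = -1 then 0
  else
    ((PySem.Chars.splitOn (PySem.Str.slice seq (some (first + 1)) none).toList ['1']).map
        (fun part => if PySem.Chars.isIn ['2'] part then (1 : Int) else 0)).sum

-- ===== PRECONDITION & SPEC =====
def Spec_deadlock (seq : String) (out : Int) : Prop := out = deadlock_alt seq
instance (seq : String) (out : Int) : Decidable (Spec_deadlock seq out) := by unfold Spec_deadlock; infer_instance

-- ===== CLAIM (what is proved, stated in full; the proofs are below) =====
def Claim_equal_deadlock : Prop := ∀ (seq : String), Dom_deadlock seq → Spec_deadlock seq (deadlock seq)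

-- ===== LEMMAS AND PROOFS =====

-- fuel-free version of PySem.Chars.splitOn.go for the single-char separator ['1']
def dlSplit : List Char → List Char → List (List Char) → List (List Char)
  | [], cur, acc => (cur.reverse :: acc).reverse
  | a :: t, cur, acc =>
    if a = '1' then dlSplit t [] (cur.reverse :: acc) else dlSplit t (a :: cur) acc

theorem go_eq_dlSplit : ∀ (fuel : Nat) (l cur : List Char) (acc : List (List Char)),
    l.length ≤ fuel → PySem.Chars.splitOn.go ['1'] fuel l cur acc = dlSplit l cur acc := by
  intro fuel
  induction fuel with
  | zero =>
    intro l cur acc h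
    have : l = [] := by cases l <;> simp_all
    subst this
    simp [PySem.Chars.splitOn.go, dlSplit]
  | succ n ih =>
    intro l cur acc h
    cases l with
    | nil => simp [PySem.Chars.splitOn.go, dlSplit]
    | cons a t =>
      simp only [PySem.Chars.splitOn.go, dlSplit]
      by_cases ha : a = '1'
      · subst ha
        simp only [List.isPrefixOf, BEq.rfl, Bool.true_and, if_true]
        simpa using ih t [] (cur.reverse :: acc) (by simpa using Nat.le_of_succ_le_succ h)
      · have : (['1'].isPrefixOf (a :: t)) = false := by
          simp [List.isPrefixOf]
          exact fun hx => (ha hx.symm).elim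
        rw [this]
        simp only [Bool.false_eq_true, if_false, if_neg ha]
        exact ih t (a :: cur) acc (by simpa using Nat.le_of_succ_le_succ h)

theorem splitOn_eq_dlSplit (l : List Char) :
    PySem.Chars.splitOn l ['1'] = dlSplit l [] [] := by
  unfold PySem.Chars.splitOn
  exact go_eq_dlSplit (l.length + 1) l [] [] (by omega)

theorem dlSplit_acc : ∀ (l cur : List Char) (acc : List (List Char)),
    dlSplit l cur acc = acc.reverse ++ dlSplit l cur [] := by
  intro l
  induction l with
  | nil => intro cur acc; simp [dlSplit]
  | cons a t ih =>
    intro cur acc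
    simp only [dlSplit]
    by_cases ha : a = '1'
    · simp only [if_pos ha]
      rw [ih [] (cur.reverse :: acc), ih [] [cur.reverse]]
      simp
    · simp only [if_neg ha]
      exact ih (a :: cur) acc

theorem isIn_singleton_iff (c : Char) (p : List Char) :
    PySem.Chars.isIn [c] p = true ↔ c ∈ p := by
  rw [PySem.Chars.isIn_iff_infix]
  constructor
  · intro h
    exact (List.singleton_sublist.mp h.sublist)
  · intro h
    obtain ⟨s, t, rfl⟩ := List.append_of_mem h
    exact ⟨s, t, by simp⟩

def dlInd (p : List Char) : Int := if PySem.Chars.isIn ['2'] p then (1 : Int) else 0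

theorem dlInd_eq_mem (p : List Char) : dlInd p = if '2' ∈ p then (1 : Int) else 0 := by
  unfold dlInd
  by_cases h : '2' ∈ p
  · rw [if_pos ((isIn_singleton_iff _ _).mpr h), if_pos h]
  · rw [if_neg (fun hc => h ((isIn_singleton_iff _ _).mp hc)), if_neg h]

theorem dlInd_reverse (p : List Char) : dlInd p.reverse = dlInd p := by
  simp [dlInd_eq_mem]

theorem dlInd_nil : dlInd [] = 0 := by simp [dlInd_eq_mem]

theorem dlInd_cons_two (cur : List Char) : dlInd ('2' :: cur) = 1 := by
  simp [dlInd_eq_mem]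

theorem dlInd_cons_ne (a : Char) (cur : List Char) (h : a ≠ '2') :
    dlInd (a :: cur) = dlInd cur := by
  simp [dlInd_eq_mem, List.mem_cons, Ne.symm h]

-- the inner loop (followed by A's trailing flag check) counts exactly the
-- '1'-delimited segments containing a '2'
theorem inner_counts : ∀ (l cur : List Char) (total flag : Int),
    flag = dlInd cur →
    (if (deadlockInner l total flag).2 = 1 then (deadlockInner l total flag).1 + 1
     else (deadlockInner l total flag).1)
      = total + ((dlSplit l cur []).map dlInd).sum := by
  intro l
  induction l with
  | nil =>
    intro cur total flag hf
    simp only [deadlockInner, dlSplit, List.reverse_cons, List.reverse_nil, List.nil_append,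
      List.map_cons, List.map_nil, List.sum_cons, List.sum_nil, add_zero, dlInd_reverse]
    rw [hf, dlInd_eq_mem]
    split_ifs <;> simp_all
  | cons a t ih =>
    intro cur total flag hf
    simp only [deadlockInner, dlSplit]
    by_cases h1 : a = '1'
    · simp only [if_pos h1]
      rw [dlSplit_acc t [] [cur.reverse]]
      rw [ih [] (total + flag) 0 dlInd_nil.symm]
      simp [dlInd_reverse, ← hf]
      ring
    · by_cases h2 : a = '2'
      · simp only [if_neg h1, if_pos h2]
        subst h2
        exact ih ('2' :: cur) total 1 (dlInd_cons_two cur).symm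
      · simp only [if_neg h1, if_neg h2]
        rw [ih (a :: cur) total flag (by rw [hf, dlInd_cons_ne a cur h2])]

theorem outer_no_one : ∀ (l : List Char) (total : Int), '1' ∉ l →
    deadlockOuter l total 0 = total := by
  intro l
  induction l with
  | nil => intro total _; rfl
  | cons a t ih =>
    intro total h
    simp only [deadlockOuter]
    rw [if_neg (fun ha => h (by rw [ha]; exact List.mem_cons_self ..))]
    simp only [if_neg (by norm_num : ¬ (0 : Int) = 1)]
    exact ih total (fun hm => h (List.mem_cons_of_mem _ hm))

theorem outer_split : ∀ (pre rest : List Char) (total : Int), '1' ∉ pre →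
    deadlockOuter (pre ++ '1' :: rest) total 0
      = total + ((dlSplit rest [] []).map dlInd).sum := by
  intro pre
  induction pre with
  | nil =>
    intro rest total _
    simp only [List.nil_append, deadlockOuter, if_pos]
    exact inner_counts rest [] total 0 dlInd_nil.symm
  | cons a t ih =>
    intro rest total h
    simp only [List.cons_append, deadlockOuter]
    rw [if_neg (fun ha => h (by rw [ha]; exact List.mem_cons_self ..))]
    simp only [if_neg (by norm_num : ¬ (0 : Int) = 1)]
    exact ih rest total (fun hm => h (List.mem_cons_of_mem _ hm))

-- ===== VERDICT (by name: the statement is the Claim_ definition above) =====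
theorem deadlock_spec : Claim_equal_deadlock := by
  intro seq _
  unfold Spec_deadlock deadlock deadlock_alt
  set l := seq.toList with hl
  have hfind : PySem.Str.find seq "1" = PySem.Chars.find l ['1'] := by
    simp [PySem.Str.find_eq, hl]
  by_cases hneg : PySem.Chars.find l ['1'] = -1
  · rw [hfind, if_pos hneg]
    have hno : '1' ∉ l := by
      intro hm
      have hni := (PySem.Chars.find_eq_neg_one_iff (s := l) (sub := ['1'])).mp hneg
      exact hni ((PySem.Chars.isIn_iff_infix (sub := ['1']) (s := l)).mp ((isIn_singleton_iff '1' l).mpr hm))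
    exact outer_no_one l 0 hno
  · rw [hfind, if_neg hneg]
    have hpos : 0 ≤ PySem.Chars.find l ['1'] := by
      have := PySem.Chars.neg_one_le_find (s := l) (sub := ['1'])
      omega
    obtain ⟨hpre, hmin⟩ := PySem.Chars.find_spec (s := l) (sub := ['1']) hpos
    set k := (PySem.Chars.find l ['1']).toNat with hk
    have hklen : k ≤ l.length := by
      have := PySem.Chars.find_le_length (s := l) (sub := ['1'])
      omega
    -- l.drop k = '1' :: l.drop (k+1)
    have hdrop : l.drop k = '1' :: l.drop (k + 1) := by
      rcases hpre with ⟨t, ht⟩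
      rw [← ht]
      have : l.drop (k + 1) = (l.drop k).drop 1 := by
        rw [List.drop_drop]
      rw [this, ← ht]
      simp
    have hsplit : l = l.take k ++ '1' :: l.drop (k + 1) := by
      conv_lhs => rw [← List.take_append_drop k l]
      rw [hdrop]
    have hnopre : '1' ∉ l.take k := by
      intro hm
      obtain ⟨i, hi, hgi⟩ := List.mem_iff_getElem.mp hm
      have hik : i < k := by simp at hi; omega
      have hil : i < l.length := by omega
      refine hmin i hik ?_
      have hgl : l[i]'hil = '1' := by
        have := List.getElem_take (xs := l) (i := i) (h := hi)
        rw [← this]; exact hgi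
      refine ⟨l.drop (i + 1), ?_⟩
      have hdi : l.drop i = l[i]'hil :: l.drop (i + 1) :=
        List.drop_eq_getElem_cons hil
      rw [hdi, hgl]
      rfl
    -- A side
    have hA : deadlockOuter l 0 0 = ((dlSplit (l.drop (k + 1)) [] []).map dlInd).sum := by
      conv_lhs => rw [hsplit]
      rw [outer_split _ _ _ hnopre]
      ring
    -- B side
    have hslice : (PySem.Str.slice seq (some (PySem.Chars.find l ['1'] + 1)) none).toList
        = l.drop (k + 1) := by
      rw [PySem.Str.toList_slice, ← hl]
      have : PySem.Chars.find l ['1'] + 1 = ((k + 1 : Nat) : Int) := by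
        push_cast
        omega
      rw [this, PySem.Chars.slice_eq_listSlice, PySem.List.slice_from_natCast]
    rw [hA, hslice, splitOn_eq_dlSplit]
    rfl
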